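-- pv_equiv track=rewrite | github.com/jstuart0/project-athena-oss | src/orchestrator/music_handler.py | get_room_display_names
-- ===== SOURCE A (Python) =====
-- from typing import Optional, Dict, Any, List, Set
--
-- def get_room_display_names(room_configs: Dict[str, Dict[str, Any]]) -> List[str]:
--     """Get list of room display names for voice responses."""
--     # Filter out aliases (bedroom, basement, home)
--     display_names = []
--     seen = set()
--     for name, config in room_configs.items():
--         if name in ("bedroom", "basement", "home"):
--             continue
--         display = config.get("display_name") or name.replace("_", " ").title()
--         if display not in seen:
--             display_names.append(display)
--             seen.add(display)
--     return sorted(display_names)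
-- ===== SOURCE B (Python) =====
-- def get_room_display_names(room_configs):
--     """Get list of room display names for voice responses."""
--     # Collect all display names (no dedup), skipping the alias keys.
--     names = sorted(
--         config.get("display_name") or name.replace("_", " ").title()
--         for name, config in room_configs.items()
--         if name not in ("bedroom", "basement", "home")
--     )
--     # Dedup by adjacency on the sorted list.
--     result = []
--     for d in names:
--         if not result or result[-1] != d:
--             result.append(d)
--     return result
-- ===== Notes on version B (the rewrite author's own statement) =====
-- stated objective: alternative
-- what changed: B keeps no hash set during the scan: it collects all display names with duplicates, sorts them, and deduplicates in one adjacency pass over the sorted list, whereas A deduplicates on the fly with a seen-set and sorts afterwards.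
import Mathlib
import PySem

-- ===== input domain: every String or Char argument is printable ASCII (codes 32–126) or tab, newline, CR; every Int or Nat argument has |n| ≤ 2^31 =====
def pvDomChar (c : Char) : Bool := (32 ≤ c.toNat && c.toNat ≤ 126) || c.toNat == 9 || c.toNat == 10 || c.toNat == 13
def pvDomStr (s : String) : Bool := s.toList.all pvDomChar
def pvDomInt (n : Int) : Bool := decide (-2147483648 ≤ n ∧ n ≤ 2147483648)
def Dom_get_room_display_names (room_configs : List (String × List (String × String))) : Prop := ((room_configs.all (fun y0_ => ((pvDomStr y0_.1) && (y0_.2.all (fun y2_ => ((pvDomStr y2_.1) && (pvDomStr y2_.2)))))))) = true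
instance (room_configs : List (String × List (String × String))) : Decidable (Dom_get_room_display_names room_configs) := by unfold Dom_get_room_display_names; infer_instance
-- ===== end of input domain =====

-- B collects all display names with duplicates, sorts, then dedups by an adjacency pass,
-- instead of A's on-the-fly hash-set dedup followed by sorting (objective: alternative).


-- ===== PORT A =====
-- str.title() hand-ported over List Char: exact on ASCII (a letter after a non-letter is
-- uppercased, after a letter lowercased, other characters unchanged).
def pyTitleChars : List Char → Bool → List Char
  | [], _ => []
  | c :: cs, prevAlpha =>
      (if PySem.Chars.isalpha c then
        (if prevAlpha then PySem.Chars.lowerChar c else PySem.Chars.upperChar c)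
      else c) :: pyTitleChars cs (PySem.Chars.isalpha c)

def pyTitle (s : String) : String := String.ofList (pyTitleChars s.toList false)

-- config.get("display_name") or name.replace("_", " ").title()
def displayOf (name : String) (config : List (String × String)) : String :=
  match (PySem.Dict.ofList config).get? "display_name" with
  | some s => if s = "" then pyTitle (PySem.Str.replace name "_" " ") else s
  | none => pyTitle (PySem.Str.replace name "_" " ")

def isAlias (name : String) : Bool := name == "bedroom" || name == "basement" || name == "home"

def get_room_display_names (room_configs : List (String × List (String × String))) : List String :=
  let st := room_configs.foldl
    (fun (st : List String × PySem.Set String) p =>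
      if isAlias p.1 then st
      else
        let display := displayOf p.1 p.2
        if PySem.Set.contains st.2 display then st
        else (st.1 ++ [display], PySem.Set.add st.2 display))
    ([], PySem.Set.empty)
  PySem.List.sorted st.1 (fun x => x) false

-- ===== PORT B =====
def get_room_display_names_alt (room_configs : List (String × List (String × String))) : List String :=
  let names := PySem.List.sorted
    ((room_configs.filter (fun p => !isAlias p.1)).map (fun p => displayOf p.1 p.2))
    (fun x => x) false
  names.foldl (fun result d =>
    if result = [] ∨ result.getLast? ≠ some d then result ++ [d] else result) []

-- ===== PRECONDITION & SPEC =====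
def Spec_get_room_display_names (room_configs : List (String × List (String × String))) (out : List String) : Prop := out = get_room_display_names_alt room_configs
instance (room_configs : List (String × List (String × String))) (out : List String) : Decidable (Spec_get_room_display_names room_configs out) := by unfold Spec_get_room_display_names; infer_instance

-- ===== CLAIM (what is proved, stated in full; the proofs are below) =====
def Claim_equal_get_room_display_names : Prop := ∀ (room_configs : List (String × List (String × String))), Dom_get_room_display_names room_configs → Spec_get_room_display_names room_configs (get_room_display_names room_configs)

-- ===== LEMMAS AND PROOFS =====

-- the multiset of display names both programs draw from
def pvDisplays (cfgs : List (String × List (String × String))) : List String :=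
  (cfgs.filter (fun p => !isAlias p.1)).map (fun p => displayOf p.1 p.2)

-- A's loop invariant: the accumulator stays Nodup and its members are acc ∪ displays
theorem aLoop_inv (cfgs : List (String × List (String × String)))
    (acc : List String) (seen : PySem.Set String)
    (hseen : ∀ x, x ∈ seen ↔ x ∈ acc) (hnd : acc.Nodup) :
    ((cfgs.foldl
      (fun (st : List String × PySem.Set String) p =>
        if isAlias p.1 then st
        else
          let display := displayOf p.1 p.2
          if PySem.Set.contains st.2 display then st
          else (st.1 ++ [display], PySem.Set.add st.2 display))
      (acc, seen)).1.Nodup ∧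
    ∀ x, x ∈ (cfgs.foldl
      (fun (st : List String × PySem.Set String) p =>
        if isAlias p.1 then st
        else
          let display := displayOf p.1 p.2
          if PySem.Set.contains st.2 display then st
          else (st.1 ++ [display], PySem.Set.add st.2 display))
      (acc, seen)).1 ↔ x ∈ acc ∨ x ∈ pvDisplays cfgs) := by
  induction cfgs generalizing acc seen with
  | nil => exact ⟨hnd, by simp [pvDisplays]⟩
  | cons p rest ih =>
    simp only [List.foldl_cons]
    by_cases ha : isAlias p.1 = true
    · have hdisp : pvDisplays (p :: rest) = pvDisplays rest := by
        simp [pvDisplays, ha]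
      simp only [if_pos ha]
      obtain ⟨h1, h2⟩ := ih acc seen hseen hnd
      exact ⟨h1, fun x => by rw [h2, hdisp]⟩
    · have hdisp : pvDisplays (p :: rest) = displayOf p.1 p.2 :: pvDisplays rest := by
        simp [pvDisplays, ha]
      simp only [if_neg ha]
      by_cases hc : PySem.Set.contains seen (displayOf p.1 p.2) = true
      · simp only [if_pos hc]
        obtain ⟨h1, h2⟩ := ih acc seen hseen hnd
        have hm : displayOf p.1 p.2 ∈ acc :=
          (hseen _).mp ((PySem.Set.contains_iff _ _).mp hc)
        refine ⟨h1, fun x => ?_⟩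
        rw [h2, hdisp]
        simp only [List.mem_cons]
        constructor
        · rintro (h | h)
          · exact Or.inl h
          · exact Or.inr (Or.inr h)
        · rintro (h | h | h)
          · exact Or.inl h
          · exact Or.inl (h ▸ hm)
          · exact Or.inr h
      · simp only [if_neg hc]
        have hnm : displayOf p.1 p.2 ∉ acc := fun h =>
          hc ((PySem.Set.contains_iff _ _).mpr ((hseen _).mpr h))
        have hseen' : ∀ x, x ∈ PySem.Set.add seen (displayOf p.1 p.2) ↔
            x ∈ acc ++ [displayOf p.1 p.2] := by
          intro x
          rw [PySem.Set.mem_add]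
          simp [hseen x]
        have hnd' : (acc ++ [displayOf p.1 p.2]).Nodup := by
          refine List.Nodup.append hnd (List.nodup_singleton _) ?_
          intro a ha hb
          rw [List.mem_singleton] at hb
          exact hnm (hb ▸ ha)
        obtain ⟨h1, h2⟩ := ih (acc ++ [displayOf p.1 p.2]) _ hseen' hnd'
        refine ⟨h1, fun x => ?_⟩
        rw [h2, hdisp]
        simp only [List.mem_append, List.mem_singleton, List.mem_cons]
        tauto

-- B's adjacency-dedup loop: on a ≤-sorted input it returns a Nodup, ≤-sorted list with the
-- same members as acc ∪ input
theorem bLoop_inv (l : List String) (hl : l.Pairwise (· ≤ ·)) (acc : List String)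
    (hnd : acc.Nodup) (hp : acc.Pairwise (· ≤ ·))
    (hle : ∀ a ∈ acc, ∀ x ∈ l, a ≤ x) :
    (l.foldl (fun result d =>
      if result = [] ∨ result.getLast? ≠ some d then result ++ [d] else result) acc).Nodup ∧
    (l.foldl (fun result d =>
      if result = [] ∨ result.getLast? ≠ some d then result ++ [d] else result) acc).Pairwise (· ≤ ·) ∧
    ∀ x, x ∈ (l.foldl (fun result d =>
      if result = [] ∨ result.getLast? ≠ some d then result ++ [d] else result) acc) ↔
      x ∈ acc ∨ x ∈ l := by
  induction l generalizing acc with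
  | nil => exact ⟨hnd, hp, by simp⟩
  | cons d rest ih =>
    have hdle : ∀ x ∈ rest, d ≤ x := fun x hx => (List.pairwise_cons.mp hl).1 x hx
    have hrest : rest.Pairwise (· ≤ ·) := (List.pairwise_cons.mp hl).2
    simp only [List.foldl_cons]
    by_cases hcond : acc = [] ∨ acc.getLast? ≠ some d
    · simp only [if_pos hcond]
      have hnm : d ∉ acc := by
        intro hmem
        have hne : acc ≠ [] := List.ne_nil_of_mem hmem
        rcases hcond with h | h
        · exact hne h
        have hlast : acc.getLast? = some (acc.getLast hne) := List.getLast?_eq_some_getLast hne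
        obtain ⟨ys, hys⟩ := List.getLast?_eq_some_iff.mp hlast
        have hne2 : d ≠ acc.getLast hne := fun he => h (he ▸ hlast)
        have h1 : acc.getLast hne ≤ d :=
          hle _ (List.getLast_mem hne) d List.mem_cons_self
        have hd' : d ∈ ys := by
          rw [hys] at hmem
          rcases List.mem_append.mp hmem with h' | h'
          · exact h'
          · exact absurd (List.mem_singleton.mp h') hne2
        have h2 : d ≤ acc.getLast hne := by
          rw [hys] at hp
          exact (List.pairwise_append.mp hp).2.2 d hd' _ (List.mem_singleton_self _)
        exact hne2 (le_antisymm h2 h1)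
      have hnd' : (acc ++ [d]).Nodup := by
        refine List.Nodup.append hnd (List.nodup_singleton _) ?_
        intro a ha hb
        rw [List.mem_singleton] at hb
        exact hnm (hb ▸ ha)
      have hp' : (acc ++ [d]).Pairwise (· ≤ ·) := by
        rw [List.pairwise_append]
        exact ⟨hp, List.pairwise_singleton _ _, fun a ha x hx =>
          (List.mem_singleton.mp hx) ▸ hle a ha d List.mem_cons_self⟩
      have hle' : ∀ a ∈ acc ++ [d], ∀ x ∈ rest, a ≤ x := by
        intro a ha x hx
        rcases List.mem_append.mp ha with h' | h'
        · exact hle a h' x (List.mem_cons_of_mem _ hx)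
        · exact (List.mem_singleton.mp h') ▸ hdle x hx
      obtain ⟨h1, h2, h3⟩ := ih hrest (acc ++ [d]) hnd' hp' hle'
      refine ⟨h1, h2, fun x => ?_⟩
      rw [h3]
      simp only [List.mem_append, List.mem_singleton, List.mem_cons]
      tauto
    · simp only [if_neg hcond]
      rw [not_or, not_ne_iff] at hcond
      have hdm : d ∈ acc := List.mem_of_getLast? hcond.2
      have hle' : ∀ a ∈ acc, ∀ x ∈ rest, a ≤ x := fun a ha x hx =>
        hle a ha x (List.mem_cons_of_mem _ hx)
      obtain ⟨h1, h2, h3⟩ := ih hrest acc hnd hp hle'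
      refine ⟨h1, h2, fun x => ?_⟩
      rw [h3]
      simp only [List.mem_cons]
      constructor
      · rintro (h | h)
        · exact Or.inl h
        · exact Or.inr (Or.inr h)
      · rintro (h | h | h)
        · exact Or.inl h
        · exact Or.inl (h ▸ hdm)
        · exact Or.inr h

-- ===== VERDICT (by name: the statement is the Claim_ definition above) =====
theorem get_room_display_names_spec : Claim_equal_get_room_display_names := by
  intro cfgs _
  unfold Spec_get_room_display_names get_room_display_names get_room_display_names_alt
  obtain ⟨hAnd, hAmem⟩ := aLoop_inv cfgs [] PySem.Set.empty (by simp [PySem.Set.empty]) List.nodup_nil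
  set rA := (cfgs.foldl _ ([], PySem.Set.empty)).1 with hrA
  set names := PySem.List.sorted (pvDisplays cfgs) (fun x => x) false with hnames
  have hnp : names.Pairwise (· ≤ ·) := by
    have := PySem.List.sorted_pairwise (xs := pvDisplays cfgs) (key := fun x => x)
    simpa using this
  obtain ⟨hBnd, hBp, hBmem⟩ := bLoop_inv names hnp [] List.nodup_nil List.Pairwise.nil (by simp)
  set rB := names.foldl _ [] with hrB
  -- rB is a ≤-sorted Nodup rearrangement of rA's members, hence equals sorted(rA)
  have hmem : ∀ x, x ∈ rB ↔ x ∈ rA := by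
    intro x
    rw [hBmem x, hAmem x, hnames]
    simp [PySem.List.mem_sorted]
  have hperm : rB.Perm rA := (List.perm_ext_iff_of_nodup hBnd hAnd).mpr hmem
  exact PySem.List.sorted_id_eq_of_perm_of_pairwise rA rB hperm hBp
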